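-- pv_equiv track=rewrite | github.com/hiranyey/aoc | 2015/14/main.py | Part2
-- ===== SOURCE A (Python) =====
-- def FinaLocation(finalData, time):
--     return finalData[0] * finalData[1] * int(
--         time / (finalData[2] + finalData[1])
--     ) + finalData[0] * min(finalData[1], time % (finalData[2] + finalData[1]))
--
-- def Part2(listOfReindeers, maxTime):
--     time = 1
--     points = [0]*len(listOfReindeers)
--     while time <= maxTime:
--         newList = [FinaLocation(finalData, time) for finalData in listOfReindeers]
--         newMax = max(newList)
--         for i,x in enumerate(newList):
--             if(x==newMax):
--                 points[i]+=1
--         time += 1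
--     return max(points)
-- ===== SOURCE B (Python) =====
-- def Part2(listOfReindeers, maxTime):
--     n = len(listOfReindeers)
--     pos = [0] * n
--     points = [0] * n
--     for t in range(1, maxTime + 1):
--         for i, (speed, fly, rest) in enumerate(listOfReindeers):
--             if (t - 1) % (fly + rest) < fly:
--                 pos[i] += speed
--         lead = max(pos)
--         for i in range(n):
--             if pos[i] == lead:
--                 points[i] += 1
--     return max(points)
-- ===== Notes on version B (the rewrite author's own statement) =====
-- stated objective: faster
-- what changed: A recomputes each reindeer's position from a closed-form distance formula (two divisions and a min) at every second; B simulates incrementally, keeping a position array that advances by speed whenever the phase (t-1) % (fly+rest) is inside the flying window, then awards the per-second tie points. Pre_ excludes empty lists and (for maxTime>=1) reindeer with fly+rest==0, where A raises, and reindeer with a negative fly or rest duration - outside the task's natural domain - where A's float-truncation closed form assigns accidental distances an incremental simulation does not reproduce.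
-- outside the precondition, e.g. on Part2([(2, -1, 2), (-5, 1, 1)], 2): A returns 1, B returns 2
import Mathlib
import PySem

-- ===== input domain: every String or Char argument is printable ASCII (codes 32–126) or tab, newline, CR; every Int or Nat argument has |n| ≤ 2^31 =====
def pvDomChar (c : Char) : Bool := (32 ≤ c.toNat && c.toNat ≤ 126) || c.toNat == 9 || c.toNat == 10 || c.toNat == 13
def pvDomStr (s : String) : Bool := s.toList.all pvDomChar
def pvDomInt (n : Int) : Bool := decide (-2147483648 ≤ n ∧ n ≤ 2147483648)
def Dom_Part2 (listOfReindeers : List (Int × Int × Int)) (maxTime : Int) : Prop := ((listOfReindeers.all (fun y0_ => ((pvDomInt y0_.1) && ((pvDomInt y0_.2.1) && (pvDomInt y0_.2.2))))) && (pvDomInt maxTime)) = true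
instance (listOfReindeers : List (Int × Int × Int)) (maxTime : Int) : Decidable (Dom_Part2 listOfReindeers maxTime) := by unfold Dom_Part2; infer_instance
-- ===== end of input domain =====

-- B replaces A's per-second closed-form distance recomputation by an incremental
-- simulation (a position array advanced by speed during each reindeer's flying phase);
-- objective: faster by a constant factor (measured): additive updates replace per-tick closed-form division.


-- ===== PORT A =====
-- int(time / c) in A is float true division then int(): on the admitted inputs (1 ≤ time,
-- |time|,|c| ≤ 2^32) this is exactly truncation toward zero, i.e. Int.tdiv.
def FinaLocation (finalData : Int × Int × Int) (time : Int) : Int :=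
  finalData.1 * finalData.2.1 * (Int.tdiv time (finalData.2.2 + finalData.2.1))
    + finalData.1 * min finalData.2.1 (PySem.Int.mod time (finalData.2.2 + finalData.2.1))

-- the body of A's while loop (one second)
def pvStepA (listOfReindeers : List (Int × Int × Int)) (points : List Int) (time : Int) : List Int :=
  let newList := listOfReindeers.map (fun finalData => FinaLocation finalData time)
  let newMax := (PySem.List.max? newList (fun x => x)).getD 0  -- max([]) raises: empty list is outside Pre_
  List.zipWith (fun p x => if x = newMax then p + 1 else p) points newList

def Part2 (listOfReindeers : List (Int × Int × Int)) (maxTime : Int) : Int :=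
  -- while time <= maxTime: … ; time += 1   ported as a fold over the times 1..maxTime
  let points :=
    (PySem.List.pyRange 1 (maxTime + 1) 1).foldl (pvStepA listOfReindeers)
      (List.replicate listOfReindeers.length 0)
  (PySem.List.max? points (fun x => x)).getD 0

-- ===== PORT B =====
-- the body of B's loop over t: advance every flying reindeer, then award the leaders
def pvStepB (listOfReindeers : List (Int × Int × Int)) (st : List Int × List Int) (t : Int) :
    List Int × List Int :=
  let pos := (listOfReindeers.zip st.1).map
    (fun p => if PySem.Int.mod (t - 1) (p.1.2.1 + p.1.2.2) < p.1.2.1 then p.2 + p.1.1 else p.2)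
  let lead := (PySem.List.max? pos (fun x => x)).getD 0
  let points := (st.2.zip pos).map (fun p => if p.2 = lead then p.1 + 1 else p.1)
  (pos, points)

def Part2_alt (listOfReindeers : List (Int × Int × Int)) (maxTime : Int) : Int :=
  let n := listOfReindeers.length
  let st := (PySem.List.pyRange 1 (maxTime + 1) 1).foldl (pvStepB listOfReindeers)
      (List.replicate n 0, List.replicate n 0)
  (PySem.List.max? st.2 (fun x => x)).getD 0

-- ===== PRECONDITION & SPEC =====
-- Pre_ excludes empty lists and (when the loop runs, maxTime ≥ 1) reindeer with fly + rest = 0,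
-- where A raises (ValueError / ZeroDivisionError), and reindeer with a negative fly or rest
-- duration — outside the task's natural domain — where A's float-truncation closed form assigns
-- accidental distances that an incremental simulation does not reproduce.
def Pre_Part2 (listOfReindeers : List (Int × Int × Int)) (maxTime : Int) : Prop :=
  listOfReindeers ≠ [] ∧
    (1 ≤ maxTime → ∀ d ∈ listOfReindeers, 0 ≤ d.2.1 ∧ 0 ≤ d.2.2 ∧ d.2.1 + d.2.2 ≠ 0)
instance (listOfReindeers : List (Int × Int × Int)) (maxTime : Int) : Decidable (Pre_Part2 listOfReindeers maxTime) := by unfold Pre_Part2; infer_instance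
def pvWitness_Part2 : (List (Int × Int × Int)) × Int := ([(14, 10, 127), (16, 11, 162)], 20)

def Spec_Part2 (listOfReindeers : List (Int × Int × Int)) (maxTime : Int) (out : Int) : Prop := out = Part2_alt listOfReindeers maxTime
instance (listOfReindeers : List (Int × Int × Int)) (maxTime : Int) (out : Int) : Decidable (Spec_Part2 listOfReindeers maxTime out) := by unfold Spec_Part2; infer_instance

-- ===== CLAIM (what is proved, stated in full; the proofs are below) =====
def Claim_equal_Part2 : Prop := ∀ (listOfReindeers : List (Int × Int × Int)) (maxTime : Int), Dom_Part2 listOfReindeers maxTime → Pre_Part2 listOfReindeers maxTime → Spec_Part2 listOfReindeers maxTime (Part2 listOfReindeers maxTime)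

-- ===== LEMMAS AND PROOFS =====

-- A's closed form advances by speed exactly during the flying phase (natural durations)
theorem pv_dist_step (s f r t : Int) (hf : 0 ≤ f) (hr : 0 ≤ r) (hc : f + r ≠ 0) (ht : 1 ≤ t) :
    FinaLocation (s, f, r) t
      = FinaLocation (s, f, r) (t - 1) + (if PySem.Int.mod (t - 1) (f + r) < f then s else 0) := by
  have hcpos : 0 < f + r := by omega
  unfold FinaLocation
  dsimp only
  rw [show r + f = f + r from add_comm r f,
    PySem.Int.mod_eq_emod_of_pos hcpos, PySem.Int.mod_eq_emod_of_pos hcpos,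
    Int.tdiv_eq_ediv_of_nonneg (by omega : (0:Int) ≤ t),
    Int.tdiv_eq_ediv_of_nonneg (by omega : (0:Int) ≤ t - 1)]
  set c := f + r with hc'
  set q := (t - 1) / c with hq
  set ρ := (t - 1) % c with hρ
  have hρ0 : 0 ≤ ρ := Int.emod_nonneg _ (by omega)
  have hρc : ρ < c := Int.emod_lt_of_pos _ hcpos
  have hdm : c * q + ρ = t - 1 := Int.mul_ediv_add_emod _ _
  have ht' : t = (ρ + 1) + c * q := by omega
  rcases lt_or_eq_of_le (by omega : ρ + 1 ≤ c) with hlt | heq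
  · have h1 : t / c = q := by
      rw [ht', Int.add_mul_ediv_left _ _ (by omega : c ≠ 0),
        Int.ediv_eq_zero_of_lt (by omega) hlt, zero_add]
    have h2 : t % c = ρ + 1 := by
      rw [ht', Int.add_mul_emod_self_left, Int.emod_eq_of_lt (by omega) hlt]
    rw [h1, h2]
    by_cases hρf : ρ < f
    · rw [if_pos hρf, min_eq_right (by omega : ρ + 1 ≤ f), min_eq_right (by omega : ρ ≤ f)]
      ring
    · rw [if_neg hρf, min_eq_left (by omega : f ≤ ρ + 1), min_eq_left (by omega : f ≤ ρ)]
      ring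
  · have ht2 : t = c * (q + 1) := by rw [ht']; ring_nf; omega
    have h1 : t / c = q + 1 := by
      rw [ht2, Int.mul_ediv_cancel_left _ (by omega : c ≠ 0)]
    have h2 : t % c = 0 := by
      rw [ht2, Int.mul_emod_right]
    rw [h1, h2, min_eq_right hf]
    by_cases hρf : ρ < f
    · rw [if_pos hρf, min_eq_right (by omega : ρ ≤ f)]
      have : ρ = f - 1 := by omega
      rw [this]; ring
    · rw [if_neg hρf, min_eq_left (by omega : f ≤ ρ)]
      ring

theorem pv_dist_zero (s f r : Int) (hf : 0 ≤ f) (hc : 0 < f + r) :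
    FinaLocation (s, f, r) 0 = 0 := by
  unfold FinaLocation
  dsimp only
  rw [show r + f = f + r from add_comm r f, Int.zero_tdiv,
    PySem.Int.mod_eq_emod_of_pos hc, Int.zero_emod, min_eq_right hf]
  ring

theorem pv_zip_map {α β : Type} (l : List α) (f : α → β) :
    l.zip (l.map f) = l.map (fun x => (x, f x)) := by
  induction l with
  | nil => rfl
  | cons x l ih => simp [ih]

theorem pv_zipWith_eq_zip_map {α β γ : Type} (f : α → β → γ) (l : List α) (l' : List β) :
    List.zipWith f l l' = (l.zip l').map (fun p => f p.1 p.2) := by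
  induction l generalizing l' with
  | nil => rfl
  | cons x l ih => cases l' <;> simp [ih]

-- one step of B, started from the exact positions at time a-1, equals one step of A
theorem pv_step_eq (L : List (Int × Int × Int))
    (hL : ∀ d ∈ L, 0 ≤ d.2.1 ∧ 0 ≤ d.2.2 ∧ d.2.1 + d.2.2 ≠ 0)
    (a : Int) (ha : 1 ≤ a) (pts : List Int) :
    pvStepB L (L.map (fun d => FinaLocation d (a - 1)), pts) a
      = (L.map (fun d => FinaLocation d a), pvStepA L pts a) := by
  have hpos : (L.map (fun x =>
      if PySem.Int.mod (a - 1) (x.2.1 + x.2.2) < x.2.1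
      then FinaLocation x (a - 1) + x.1 else FinaLocation x (a - 1)))
      = L.map (fun d => FinaLocation d a) := by
    refine List.map_congr_left (fun d hd => ?_)
    obtain ⟨s, f, r⟩ := d
    obtain ⟨hf, hr, hc⟩ := hL _ hd
    dsimp only at hf hr hc ⊢
    rw [pv_dist_step s f r a hf hr hc ha]
    by_cases h : PySem.Int.mod (a - 1) (f + r) < f <;> simp [h]
  unfold pvStepA pvStepB
  dsimp only
  rw [pv_zip_map, List.map_map]
  simp only [Function.comp_def]
  rw [hpos, pv_zipWith_eq_zip_map]

-- the joint loop invariant: B's fold, started from the exact positions, tracks A's fold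
theorem pv_joint (L : List (Int × Int × Int))
    (hL : ∀ d ∈ L, 0 ≤ d.2.1 ∧ 0 ≤ d.2.2 ∧ d.2.1 + d.2.2 ≠ 0) :
    ∀ (k : Nat) (a : Int), 1 ≤ a → ∀ (pts : List Int),
    ((PySem.List.pyRange a (a + k) 1).foldl (pvStepB L)
        (L.map (fun d => FinaLocation d (a - 1)), pts)).2
      = (PySem.List.pyRange a (a + k) 1).foldl (pvStepA L) pts := by
  intro k
  induction k with
  | zero =>
    intro a _ pts
    rw [show a + ((0 : Nat) : Int) = a by simp, PySem.List.pyRange_one_eq_nil (le_refl a)]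
    rfl
  | succ k ih =>
    intro a ha pts
    rw [PySem.List.pyRange_one_cons (by omega : a < a + (k + 1 : Nat))]
    rw [List.foldl_cons, List.foldl_cons, pv_step_eq L hL a ha pts]
    have h1 : a + (k + 1 : Nat) = (a + 1) + (k : Nat) := by push_cast; ring
    have h2 : a = (a + 1) - 1 := by ring
    rw [h1]
    calc ((PySem.List.pyRange (a + 1) ((a + 1) + (k : Nat)) 1).foldl (pvStepB L)
            (L.map (fun d => FinaLocation d a), pvStepA L pts a)).2
        = ((PySem.List.pyRange (a + 1) ((a + 1) + (k : Nat)) 1).foldl (pvStepB L)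
            (L.map (fun d => FinaLocation d ((a + 1) - 1)), pvStepA L pts a)).2 := by
          rw [← h2]
      _ = (PySem.List.pyRange (a + 1) ((a + 1) + (k : Nat)) 1).foldl (pvStepA L)
            (pvStepA L pts a) := ih (a + 1) (by omega) _

-- ===== VERDICT (by name: the statement is the Claim_ definition above) =====
theorem Part2_spec : Claim_equal_Part2 := by
  intro L T _hdom hpre
  unfold Spec_Part2 Part2 Part2_alt
  dsimp only
  by_cases hT : 1 ≤ T
  · have hL := hpre.2 hT
    have hinit : List.replicate L.length (0 : Int) = L.map (fun d => FinaLocation d 0) := by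
      rw [show List.replicate L.length (0 : Int) = L.map (fun _ => 0) by simp]
      refine List.map_congr_left (fun d hd => ?_)
      obtain ⟨s, f, r⟩ := d
      obtain ⟨hf, hr, hc⟩ := hL _ hd
      dsimp only at hf hr hc
      exact (pv_dist_zero s f r hf (by omega)).symm
    rw [show (T + 1 : Int) = 1 + (T.toNat : Int) by omega]
    have hj := pv_joint L hL T.toNat 1 (le_refl 1) (List.replicate L.length 0)
    simp only [show (1 : Int) - 1 = 0 from rfl] at hj
    rw [← hinit] at hj
    rw [hj]
  · rw [PySem.List.pyRange_one_eq_nil (by omega : T + 1 ≤ 1)]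
    simp
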